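-- pv_equiv track=rewrite | github.com/AlejaArteaga1/ProgrammingCourse | Chapter1_Programing_Basic/Class1-4(9)_Lists_and_Matrix/Homework_E_1.py | first_vowel_position
-- ===== SOURCE A (Python) =====
-- vowels = ["a","e","i","o","u"]
--
-- def isVowel (letter):
--     letter = letter.lower()
--     for vowel in vowels:
--         if letter == vowel:
--             return True
--     return False
--
-- def first_vowel_position(word):
--     i = 0
--     for letter in word:
--         if isVowel(letter):
--             return i
--         i += 1
--     else:
--         return -1
-- ===== SOURCE B (Python) =====
-- def first_vowel_position(word):
--     lowered = word.lower()
--     hits = [p for p in (lowered.find(v) for v in "aeiou") if p >= 0]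
--     return min(hits) if hits else -1
-- ===== Notes on version B (the rewrite author's own statement) =====
-- stated objective: alternative
-- what changed: Replaces the per-character loop (lowercasing each letter and scanning the vowel list) by one whole-word lower() followed by five str.find searches whose nonnegative results are minimised.
import Mathlib
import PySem

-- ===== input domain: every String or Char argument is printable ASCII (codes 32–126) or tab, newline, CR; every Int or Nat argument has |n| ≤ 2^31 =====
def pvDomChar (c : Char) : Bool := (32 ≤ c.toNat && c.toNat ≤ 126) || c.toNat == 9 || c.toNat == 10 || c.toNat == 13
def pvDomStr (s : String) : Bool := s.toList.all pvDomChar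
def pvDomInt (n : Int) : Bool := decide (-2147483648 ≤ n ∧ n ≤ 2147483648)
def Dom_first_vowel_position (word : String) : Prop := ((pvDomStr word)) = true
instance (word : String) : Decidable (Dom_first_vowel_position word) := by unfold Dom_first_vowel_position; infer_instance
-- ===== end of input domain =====

-- B replaces A's per-character scan (lowercasing each letter and testing it against
-- the vowel list) by one whole-word lower() followed by five str.find searches whose
-- nonnegative results are minimised; objective: alternative (differently-shaped pass).

-- ===== PORT A =====
-- module constant `vowels`
def pvVowels : List Char := ['a', 'e', 'i', 'o', 'u']

-- `isVowel`: lowercase the letter, then scan the vowel list with early return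
def pvIsVowelGo (letter : Char) : List Char → Bool
  | [] => false
  | v :: rest => if letter = v then true else pvIsVowelGo letter rest

def pvIsVowel (letter : Char) : Bool :=
  pvIsVowelGo (PySem.Chars.lowerChar letter) pvVowels

-- the `for letter in word` loop with counter i and early return
def pvFvpGo : List Char → Int → Int
  | [], _ => -1
  | c :: rest, i => if pvIsVowel c then i else pvFvpGo rest (i + 1)

def first_vowel_position (word : String) : Int :=
  pvFvpGo word.toList 0

-- ===== PORT B =====
def first_vowel_position_alt (word : String) : Int :=
  let lowered := PySem.Str.lower word
  let hits := (("aeiou".toList).map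
      (fun v => PySem.Str.find lowered (String.ofList [v]))).filter (fun p => decide (0 ≤ p))
  match PySem.List.min? hits (fun x => x) with
  | some m => m
  | none => -1

-- ===== PRECONDITION & SPEC =====
def Spec_first_vowel_position (word : String) (out : Int) : Prop := out = first_vowel_position_alt word
instance (word : String) (out : Int) : Decidable (Spec_first_vowel_position word out) := by unfold Spec_first_vowel_position; infer_instance

-- ===== CLAIM (what is proved, stated in full; the proofs are below) =====
def Claim_equal_first_vowel_position : Prop := ∀ (word : String), Dom_first_vowel_position word → Spec_first_vowel_position word (first_vowel_position word)

-- ===== LEMMAS AND PROOFS =====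

-- membership in the vowel list as a Bool predicate
def pvVow (c : Char) : Bool := decide (c ∈ pvVowels)

theorem pvIsVowelGo_eq_mem (letter : Char) (vs : List Char) :
    pvIsVowelGo letter vs = decide (letter ∈ vs) := by
  induction vs with
  | nil => simp [pvIsVowelGo]
  | cons v rest ih => by_cases h : letter = v <;> simp [pvIsVowelGo, h, ih]

theorem pvIsVowel_eq (c : Char) : pvIsVowel c = pvVow (PySem.Chars.lowerChar c) := by
  simp [pvIsVowel, pvVow, pvIsVowelGo_eq_mem]

theorem aeiou_eq : "aeiou".toList = pvVowels := by decide

theorem aeiou_vow (v : Char) (hv : v ∈ "aeiou".toList) : pvVow v = true := by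
  rw [aeiou_eq, pvVowels] at hv
  simp only [List.mem_cons, List.not_mem_nil, or_false] at hv
  rcases hv with rfl | rfl | rfl | rfl | rfl <;> decide

-- A's loop in terms of findIdx?
theorem pvFvpGo_eq (l : List Char) (i : Int) :
    pvFvpGo l i = match l.findIdx? pvIsVowel with
      | some k => i + (k : Int)
      | none => -1 := by
  induction l generalizing i with
  | nil => simp [pvFvpGo]
  | cons c rest ih =>
    by_cases h : pvIsVowel c
    · simp [pvFvpGo, h, List.findIdx?_cons]
    · simp only [pvFvpGo, h, if_false, List.findIdx?_cons, Bool.false_eq_true]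
      rw [ih]
      cases hf : rest.findIdx? pvIsVowel <;> simp; ring

-- [v] is a prefix of xs iff xs starts with v
theorem singleton_prefix_iff (v : Char) (xs : List Char) :
    [v] <+: xs ↔ xs[0]? = some v := by
  constructor
  · rintro ⟨t, rfl⟩; simp
  · intro h; cases xs with
    | nil => simp at h
    | cons a t => simp at h; exact ⟨t, by simp [h]⟩

theorem singleton_prefix_drop_iff (v : Char) (xs : List Char) (n : Nat) :
    [v] <+: xs.drop n ↔ xs[n]? = some v := by
  rw [singleton_prefix_iff, List.getElem?_drop]
  simp

-- find with a one-character needle, applied to the character at the least vowel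
-- index, returns exactly that index
theorem find_singleton_eq (L : List Char) (k : Nat) (hk : k < L.length)
    (hkv : pvVow L[k] = true)
    (hmin : ∀ j (_ : j < k) (hjl : j < L.length), pvVow L[j] = false) :
    PySem.Chars.find L [L[k]] = (k : Int) := by
  have hprek : [L[k]] <+: L.drop k := (singleton_prefix_drop_iff L[k] L k).mpr (by simp [hk])
  have hmem : [L[k]] <:+: L := hprek.isInfix.trans (List.drop_suffix k L).isInfix
  have hpos : 0 ≤ PySem.Chars.find L [L[k]] := (PySem.Chars.find_nonneg_iff L [L[k]]).mpr hmem
  obtain ⟨hpre, hleast⟩ := PySem.Chars.find_spec hpos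
  set f := (PySem.Chars.find L [L[k]]).toNat with hf
  have hLf : L[f]? = some L[k] := (singleton_prefix_drop_iff _ _ _).mp hpre
  have hfk : f ≤ k := by
    by_contra h
    exact hleast k (by omega) hprek
  have hkf : k ≤ f := by
    by_contra h
    have hfl : f < L.length := by omega
    have hfalse : pvVow L[f] = false := hmin f (by omega) hfl
    rw [List.getElem?_eq_getElem hfl] at hLf
    simp only [Option.some.injEq] at hLf
    rw [hLf, hkv] at hfalse
    exact absurd hfalse (by simp)
  omega

-- any nonnegative find result for a vowel needle is at least the least vowel index
theorem find_singleton_ge (L : List Char) (v : Char) (hv : pvVow v = true) (k : Nat)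
    (hmin : ∀ j (_ : j < k) (hjl : j < L.length), pvVow L[j] = false)
    (hpos : 0 ≤ PySem.Chars.find L [v]) :
    (k : Int) ≤ PySem.Chars.find L [v] := by
  obtain ⟨hpre, -⟩ := PySem.Chars.find_spec hpos
  set f := (PySem.Chars.find L [v]).toNat with hf
  have hLf : L[f]? = some v := (singleton_prefix_drop_iff _ _ _).mp hpre
  have hfl : f < L.length := by
    by_contra h
    rw [List.getElem?_eq_none (by omega)] at hLf; exact absurd hLf (by simp)
  by_contra h
  have hfalse : pvVow L[f] = false := hmin f (by omega) hfl
  rw [List.getElem?_eq_getElem hfl] at hLf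
  simp only [Option.some.injEq] at hLf
  rw [hLf, hv] at hfalse
  exact absurd hfalse (by simp)

-- if no character of L is a vowel, every vowel needle is absent
theorem find_singleton_none (L : List Char) (v : Char) (hv : pvVow v = true)
    (hno : ∀ c ∈ L, pvVow c = false) :
    PySem.Chars.find L [v] = -1 := by
  rw [PySem.Chars.find_eq_neg_one_iff]
  intro hin
  have hmem : v ∈ L := hin.sublist.subset (by simp)
  have := hno v hmem
  rw [hv] at this; exact absurd this (by simp)

-- B in terms of findIdx? over the lowered list
theorem alt_eq (word : String) :
    first_vowel_position_alt word =
      match (PySem.Chars.lower word.toList).findIdx? pvVow with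
      | some k => (k : Int)
      | none => -1 := by
  unfold first_vowel_position_alt
  set L := PySem.Chars.lower word.toList with hL
  have hLlist : (PySem.Str.lower word).toList = L := PySem.Str.toList_lower word
  have hfind : ∀ v : Char, PySem.Str.find (PySem.Str.lower word) (String.ofList [v])
      = PySem.Chars.find L [v] := by
    intro v; rw [PySem.Str.find_eq, hLlist]; simp
  simp only [hfind]
  set hits := (("aeiou".toList).map (fun v => PySem.Chars.find L [v])).filter
      (fun p => decide (0 ≤ p)) with hhits
  cases hidx : L.findIdx? pvVow with
  | none =>
    have hno : ∀ c ∈ L, pvVow c = false := List.findIdx?_eq_none_iff.mp hidx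
    have hnil : hits = [] := by
      rw [hhits, List.filter_eq_nil_iff]
      intro p hp
      obtain ⟨v, hv, rfl⟩ := List.mem_map.mp hp
      rw [find_singleton_none L v (aeiou_vow v hv) hno]; decide
    rw [hnil]; simp [PySem.List.min?]
  | some k =>
    obtain ⟨hkl, hkv, hmin⟩ := List.findIdx?_eq_some_iff_getElem.mp hidx
    simp only [Bool.not_eq_true] at hmin
    have hminf : ∀ j (_ : j < k) (hjl : j < L.length), pvVow L[j] = false := by
      intro j hj hjl; exact hmin j hj
    have hkmem : (k : Int) ∈ hits := by
      rw [hhits, List.mem_filter]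
      refine ⟨List.mem_map.mpr ⟨L[k], ?_, find_singleton_eq L k hkl hkv hminf⟩, by simp⟩
      rw [aeiou_eq]
      exact of_decide_eq_true hkv
    have hge : ∀ x ∈ hits, (k : Int) ≤ x := by
      intro x hx
      rw [hhits, List.mem_filter] at hx
      obtain ⟨hxm, hxpos⟩ := hx
      obtain ⟨v, hv, rfl⟩ := List.mem_map.mp hxm
      exact find_singleton_ge L v (aeiou_vow v hv) k hminf (of_decide_eq_true hxpos)
    cases hm : PySem.List.min? hits (fun x => x) with
    | none =>
      rw [PySem.List.min?_eq_none_iff] at hm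
      rw [hm] at hkmem; exact absurd hkmem (by simp)
    | some m =>
      have h1 : m ≤ (k : Int) := PySem.List.min?_isMin hm _ hkmem
      have h2 : (k : Int) ≤ m := hge m (PySem.List.min?_mem hm)
      simp [le_antisymm h1 h2]

-- ===== VERDICT (by name: the statement is the Claim_ definition above) =====
theorem first_vowel_position_spec : Claim_equal_first_vowel_position := by
  intro word _
  unfold Spec_first_vowel_position
  rw [alt_eq]
  unfold first_vowel_position
  rw [pvFvpGo_eq]
  have hcomp : pvIsVowel = pvVow ∘ PySem.Chars.lowerChar := funext pvIsVowel_eq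
  have hmap : (PySem.Chars.lower word.toList).findIdx? pvVow
      = word.toList.findIdx? pvIsVowel := by
    rw [PySem.Chars.lower, List.findIdx?_map, hcomp]
  rw [hmap]
  cases word.toList.findIdx? pvIsVowel <;> simp
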